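-- pv_equiv track=rewrite | github.com/ajobi-uhc/interp-agent-bench | scribe/modal/interp_client.py | convert_technique_to_standalone
-- ===== SOURCE A (Python) =====
-- def convert_technique_to_standalone(technique_code: str) -> str:
--     """Convert a technique method from ModelService class format to standalone function.
--
--     This helper converts techniques written for the old class-based API to work
--     with the new execute() API.
--
--     Args:
--         technique_code: Method code from technique file (with self parameter)
--
--     Returns:
--         Standalone function code (model, tokenizer parameters instead of self)
--
--     Example:
--         # Old format (in technique file):
--         def prefill_attack(self, user_prompt: str, prefill_text: str):
--             inputs = self.tokenizer(...)
--             outputs = self.model.generate(...)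
--
--         # Converted format:
--         def prefill_attack(model, tokenizer, user_prompt: str, prefill_text: str):
--             inputs = tokenizer(...)
--             outputs = model.generate(...)
--     """
--     lines = technique_code.split("\n")
--     converted_lines = []
--
--     for line in lines:
--         # Replace self.model with model
--         line = line.replace("self.model", "model")
--         # Replace self.tokenizer with tokenizer
--         line = line.replace("self.tokenizer", "tokenizer")
--         # Update function signature (self -> model, tokenizer)
--         if line.strip().startswith("def ") and "(self," in line:
--             line = line.replace("(self,", "(model, tokenizer,", 1)
--         elif line.strip().startswith("def ") and "(self)" in line:
--             line = line.replace("(self)", "(model, tokenizer)", 1)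
--
--         converted_lines.append(line)
--
--     return "\n".join(converted_lines)
-- ===== SOURCE B (Python) =====
-- _ATTRS = (("self.model", "model"), ("self.tokenizer", "tokenizer"))
--
--
-- def _rewrite_attrs(s):
--     """Pass 1: single left-to-right scan replacing every attribute access."""
--     out = []
--     i = 0
--     n = len(s)
--     while i < n:
--         for pat, repl in _ATTRS:
--             if s.startswith(pat, i):
--                 out.append(repl)
--                 i += len(pat)
--                 break
--         else:
--             out.append(s[i])
--             i += 1
--     return "".join(out)
--
--
-- def _sig_target(s, i):
--     """Which signature pattern (if any) the line starting at i should rewrite."""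
--     j = s.find("\n", i)
--     line = s[i:] if j < 0 else s[i:j]
--     if line.strip().startswith("def "):
--         if "(self," in line:
--             return ("(self,", "(model, tokenizer,")
--         if "(self)" in line:
--             return ("(self)", "(model, tokenizer)")
--     return None
--
--
-- def _rewrite_signatures(s):
--     """Pass 2: scan with a per-line state; rewrite at most one signature per line."""
--     out = []
--     i = 0
--     n = len(s)
--     target = _sig_target(s, 0)
--     while i < n:
--         c = s[i]
--         if c == "\n":
--             out.append(c)
--             i += 1
--             target = _sig_target(s, i)
--         elif target is not None and s.startswith(target[0], i):
--             out.append(target[1])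
--             i += len(target[0])
--             target = None
--         else:
--             out.append(c)
--             i += 1
--     return "".join(out)
--
--
-- def convert_technique_to_standalone(technique_code: str) -> str:
--     return _rewrite_signatures(_rewrite_attrs(technique_code))
-- ===== Notes on version B (the rewrite author's own statement) =====
-- stated objective: alternative
-- what changed: B abandons A's line-split / str.replace / join structure for two explicit index-based character scanners over the whole string: pass 1 is a single merged left-to-right scan rewriting both attribute accesses in one traversal, pass 2 is a stateful scanner that tracks the current line's signature target (computed by lookahead at each line start) and rewrites at most one signature occurrence per line; it trades the speed of CPython's built-in string methods for explicit per-character control.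
import Mathlib
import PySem

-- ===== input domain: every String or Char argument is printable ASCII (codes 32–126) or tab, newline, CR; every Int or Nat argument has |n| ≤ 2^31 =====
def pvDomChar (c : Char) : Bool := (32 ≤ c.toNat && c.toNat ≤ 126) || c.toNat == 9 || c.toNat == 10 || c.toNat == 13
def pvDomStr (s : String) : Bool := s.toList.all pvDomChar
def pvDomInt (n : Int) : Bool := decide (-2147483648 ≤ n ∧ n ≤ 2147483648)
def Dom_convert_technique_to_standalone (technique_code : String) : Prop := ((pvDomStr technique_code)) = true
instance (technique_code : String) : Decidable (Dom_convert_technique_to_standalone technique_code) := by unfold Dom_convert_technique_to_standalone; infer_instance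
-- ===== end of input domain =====

set_option maxRecDepth 8000


-- B replaces A's split/str.replace/join pipeline with two explicit index-based character
-- scanners over the whole string (merged attribute scan, then a stateful per-line signature
-- scan); same return value as A (alternative decomposition, no speed claim).

-- ===== PORT A =====
-- hand port of Python str.replace(old, new, 1) (count = 1): replace the FIRST occurrence only;
-- exact for nonempty old (both call sites use nonempty patterns)
def pvReplaceOnce (old new : List Char) : List Char → List Char
  | [] => []
  | c :: t =>
    if old.isPrefixOf (c :: t) then new ++ (c :: t).drop old.length
    else c :: pvReplaceOnce old new t

-- the body of A's per-line loop: two replaces, then the if/elif signature update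
def pvLineA (line : List Char) : List Char :=
  let l1 := PySem.Chars.replace line "self.model".toList "model".toList
  let l2 := PySem.Chars.replace l1 "self.tokenizer".toList "tokenizer".toList
  if PySem.Chars.startswith (PySem.Chars.strip l2) "def ".toList
      && PySem.Chars.isIn "(self,".toList l2 then
    pvReplaceOnce "(self,".toList "(model, tokenizer,".toList l2
  else if PySem.Chars.startswith (PySem.Chars.strip l2) "def ".toList
      && PySem.Chars.isIn "(self)".toList l2 then
    pvReplaceOnce "(self)".toList "(model, tokenizer)".toList l2
  else l2

def convert_technique_to_standalone (technique_code : String) : String :=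
  String.ofList (PySem.Chars.join "\n".toList
    (((PySem.Chars.splitOn technique_code.toList "\n".toList).map pvLineA)))

-- ===== PORT B =====
-- pass 1 of Source B (_rewrite_attrs): one left-to-right scan replacing both attribute accesses
def pvAttrScan : List Char → List Char
  | [] => []
  | c :: t =>
    if ("self.model".toList).isPrefixOf (c :: t) then
      "model".toList ++ pvAttrScan ((c :: t).drop 10)
    else if ("self.tokenizer".toList).isPrefixOf (c :: t) then
      "tokenizer".toList ++ pvAttrScan ((c :: t).drop 14)
    else
      c :: pvAttrScan t
termination_by l => l.length
decreasing_by all_goals simp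

-- Source B's _sig_target: the (pattern, replacement) choice for the line starting here, encoded
-- as Option Bool (true ↦ "(self,', false ↦ "(self)"); the Python tuple is recovered by
-- pvSigPat/pvSigRep.  Python's s.find("\n", i) + slice is exactly takeWhile (· ≠ '\n') here.
def pvSigPat (b : Bool) : List Char := if b then "(self,".toList else "(self)".toList
def pvSigRep (b : Bool) : List Char := if b then "(model, tokenizer,".toList else "(model, tokenizer)".toList

def pvSigTarget (rest : List Char) : Option Bool :=
  let line := rest.takeWhile (fun c => c != '\n')
  if PySem.Chars.startswith (PySem.Chars.strip line) "def ".toList then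
    if PySem.Chars.isIn "(self,".toList line then some true
    else if PySem.Chars.isIn "(self)".toList line then some false
    else none
  else none

-- pass 2 of Source B (_rewrite_signatures): scan with per-line target state
def pvSigScan : Option Bool → List Char → List Char
  | _, [] => []
  | tgt, c :: t =>
    if c = '\n' then c :: pvSigScan (pvSigTarget t) t
    else
      match tgt with
      | some b =>
        if (pvSigPat b).isPrefixOf (c :: t) then
          pvSigRep b ++ pvSigScan none ((c :: t).drop (pvSigPat b).length)
        else c :: pvSigScan (some b) t
      | none => c :: pvSigScan none t
termination_by _ l => l.length
decreasing_by
  all_goals simp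
  all_goals (rename_i b h; cases b <;> simp [pvSigPat])

def convert_technique_to_standalone_alt (technique_code : String) : String :=
  let code := pvAttrScan technique_code.toList
  String.ofList (pvSigScan (pvSigTarget code) code)

-- ===== PRECONDITION & SPEC =====
def Spec_convert_technique_to_standalone (technique_code : String) (out : String) : Prop := out = convert_technique_to_standalone_alt technique_code
instance (technique_code : String) (out : String) : Decidable (Spec_convert_technique_to_standalone technique_code out) := by unfold Spec_convert_technique_to_standalone; infer_instance

-- ===== CLAIM (what is proved, stated in full; the proofs are below) =====
def Claim_equal_convert_technique_to_standalone : Prop := ∀ (technique_code : String), Dom_convert_technique_to_standalone technique_code → Spec_convert_technique_to_standalone technique_code (convert_technique_to_standalone technique_code)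

-- ===== LEMMAS AND PROOFS =====

-- A's per-line signature fixup, as a standalone function (proof-layer only)
def pvFixDefSignature (line : List Char) : List Char :=
  if PySem.Chars.startswith (PySem.Chars.strip line) "def ".toList then
    if PySem.Chars.isIn "(self,".toList line then
      pvReplaceOnce "(self,".toList "(model, tokenizer,".toList line
    else if PySem.Chars.isIn "(self)".toList line then
      pvReplaceOnce "(self)".toList "(model, tokenizer)".toList line
    else line
  else line

-- structural (unfueled) version of PySem.Chars.replace, for proofs
def pvRep (old new : List Char) : List Char → List Char
  | [] => []
  | c :: t =>
    match old with
    | [] => c :: pvRep [] new t    -- never used (old = [] is excluded below); keeps the def total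
    | o :: os =>
      if (o :: os).isPrefixOf (c :: t) then new ++ pvRep (o :: os) new (t.drop os.length)
      else c :: pvRep (o :: os) new t
termination_by l => l.length
decreasing_by all_goals (simp; try omega)

-- structural version of PySem.Chars.splitOn · ['\n'], for proofs
def pvConsHead (a : List Char) : List (List Char) → List (List Char)
  | [] => [a]
  | h :: r => (a ++ h) :: r

def pvSplit : List Char → List (List Char)
  | [] => [[]]
  | c :: t => if c = '\n' then [] :: pvSplit t else pvConsHead [c] (pvSplit t)

def pvJoinNL : List (List Char) → List Char
  | [] => []
  | [a] => a
  | a :: b :: r => a ++ '\n' :: pvJoinNL (b :: r)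

theorem pvSplit_ne_nil (s : List Char) : pvSplit s ≠ [] := by
  induction s with
  | nil => simp [pvSplit]
  | cons c t ih =>
    simp only [pvSplit]
    split
    · simp
    · cases h : pvSplit t with
      | nil => exact absurd h ih
      | cons a r => simp [pvConsHead]

theorem pvConsHead_consHead (a b : List Char) (X : List (List Char)) :
    pvConsHead a (pvConsHead b X) = pvConsHead (a ++ b) X := by
  cases X <;> simp [pvConsHead]

theorem pvConsHead_nil (X : List (List Char)) (h : X ≠ []) : pvConsHead [] X = X := by
  cases X with
  | nil => exact absurd rfl h
  | cons a r => simp [pvConsHead]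

-- bridge: the fueled replace.go is pvRep once the fuel covers the input
theorem pvReplaceGo_eq (old new : List Char) (hold : old ≠ []) :
    ∀ (fuel : Nat) (l acc : List Char), l.length ≤ fuel →
      PySem.Chars.replace.go old new fuel l acc = acc.reverse ++ pvRep old new l := by
  intro fuel
  induction fuel with
  | zero =>
    intro l acc hl
    have : l = [] := List.eq_nil_of_length_eq_zero (Nat.le_zero.mp hl)
    subst this
    simp [PySem.Chars.replace.go, pvRep]
  | succ n ih =>
    intro l acc hl
    cases l with
    | nil => simp [PySem.Chars.replace.go, pvRep]
    | cons c t =>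
      obtain ⟨o, os, rfl⟩ : ∃ o os, old = o :: os := by
        cases old with
        | nil => exact absurd rfl hold
        | cons o os => exact ⟨o, os, rfl⟩
      simp only [PySem.Chars.replace.go]
      split
      · rename_i hpre
        rw [ih (List.drop (o :: os).length (c :: t)) (new.reverse ++ acc)
          (by simp only [List.length_cons] at hl; simp only [List.length_drop,
            List.length_cons]; omega)]
        simp [pvRep, hpre]
      · rename_i hpre
        rw [ih t (c :: acc) (by simp only [List.length_cons] at hl; omega)]
        simp [pvRep, hpre]

theorem pvReplace_eq (old new s : List Char) (hold : old ≠ []) :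
    PySem.Chars.replace s old new = pvRep old new s := by
  unfold PySem.Chars.replace
  rw [if_neg (by simpa using hold)]
  simpa using pvReplaceGo_eq old new hold s.length s [] le_rfl

-- bridge: the fueled splitOn.go at separator "\n" is pvSplit once the fuel covers the input
theorem pvSplitGo_eq :
    ∀ (fuel : Nat) (l cur : List Char) (acc : List (List Char)), l.length < fuel →
      PySem.Chars.splitOn.go ['\n'] fuel l cur acc =
        acc.reverse ++ pvConsHead cur.reverse (pvSplit l) := by
  intro fuel
  induction fuel with
  | zero => intro l cur acc hl; omega
  | succ n ih =>
    intro l cur acc hl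
    cases l with
    | nil => simp [PySem.Chars.splitOn.go, pvSplit, pvConsHead]
    | cons c t =>
      simp only [PySem.Chars.splitOn.go]
      split
      · rename_i hpre
        have hc : c = '\n' := by
          simp at hpre
          exact hpre.symm
        subst hc
        rw [show List.drop (['\n'] : List Char).length ('\n' :: t) = t by simp]
        rw [ih t [] (cur.reverse :: acc) (by simp only [List.length_cons] at hl; omega)]
        rw [show pvSplit ('\n' :: t) = [] :: pvSplit t by simp [pvSplit]]
        rw [List.reverse_nil, pvConsHead_nil _ (pvSplit_ne_nil t)]
        simp [pvConsHead]
      · rename_i hpre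
        have hc : ¬ c = '\n' := by
          intro h; subst h; simp at hpre
        rw [ih t (c :: cur) acc (by simp only [List.length_cons] at hl; omega)]
        rw [show pvSplit (c :: t) = pvConsHead [c] (pvSplit t) by simp [pvSplit, hc]]
        rw [pvConsHead_consHead]
        simp

theorem pvSplitOn_eq (s : List Char) :
    PySem.Chars.splitOn s ['\n'] = pvSplit s := by
  unfold PySem.Chars.splitOn
  rw [pvSplitGo_eq (s.length + 1) s [] [] (by omega)]
  simp only [List.reverse_nil, List.nil_append]
  exact pvConsHead_nil _ (pvSplit_ne_nil s)

-- the head of pvSplit s is a prefix of s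
theorem pvSplit_head_prefix : ∀ (s h : List Char) (r : List (List Char)),
    pvSplit s = h :: r → h <+: s := by
  intro s
  induction s with
  | nil => intro h r he; simp [pvSplit] at he; simp [he.1]
  | cons c t ih =>
    intro h r he
    by_cases hc : c = '\n'
    · subst hc
      simp [pvSplit] at he
      simp [he.1]
    · simp only [pvSplit, if_neg hc] at he
      cases ht : pvSplit t with
      | nil => exact absurd ht (pvSplit_ne_nil t)
      | cons h' r' =>
        rw [ht] at he
        simp [pvConsHead] at he
        obtain ⟨rfl, rfl⟩ := he
        exact (List.prefix_cons_inj c).mpr (ih h' r' ht)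

-- splitting after prepending newline-free text just extends the first piece
theorem pvSplit_append (a x : List Char) (ha : '\n' ∉ a) :
    pvSplit (a ++ x) = pvConsHead a (pvSplit x) := by
  induction a with
  | nil => simp [pvConsHead_nil _ (pvSplit_ne_nil x)]
  | cons c a' ih =>
    have hc : ¬ c = '\n' := fun h => ha (h ▸ List.mem_cons_self)
    have ha' : '\n' ∉ a' := fun h => ha (List.mem_cons_of_mem _ h)
    simp only [List.cons_append, pvSplit, if_neg hc, ih ha', pvConsHead_consHead,
      List.nil_append]

-- KEY LEMMA: replacing a newline-free pattern by newline-free text commutes with line splitting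
theorem pvSplit_rep (old new : List Char) (hold : old ≠ []) (hno : '\n' ∉ old)
    (hnn : '\n' ∉ new) : ∀ (s : List Char),
    pvSplit (pvRep old new s) = (pvSplit s).map (pvRep old new) := by
  intro s
  induction hs : s.length using Nat.strong_induction_on generalizing s with
  | _ n ih =>
  subst hs
  obtain ⟨o, os, rfl⟩ : ∃ o os, old = o :: os := by
    cases old with
    | nil => exact absurd rfl hold
    | cons o os => exact ⟨o, os, rfl⟩
  cases s with
  | nil => simp [pvRep, pvSplit]
  | cons c t =>
    by_cases hpre : (o :: os).isPrefixOf (c :: t)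
    · obtain ⟨r, hr0⟩ := List.isPrefixOf_iff_prefix.mp hpre
      have hr : c :: t = (o :: os) ++ r := hr0.symm
      have hrt : r = t.drop os.length := by
        have := congrArg (List.drop (o :: os).length) hr
        simpa using this.symm
      rw [show pvRep (o :: os) new (c :: t) = new ++ pvRep (o :: os) new (t.drop os.length) by
        simp [pvRep, hpre]]
      rw [← hrt]
      have hrlen : r.length < (c :: t).length := by
        have := congrArg List.length hr
        simp only [List.length_cons, List.length_append] at this ⊢
        omega
      rw [pvSplit_append new _ hnn, ih r.length hrlen r rfl]
      rw [show (c :: t : List Char) = (o :: os) ++ r from hr,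
        pvSplit_append (o :: os) r hno]
      cases hx : pvSplit r with
      | nil => exact absurd hx (pvSplit_ne_nil r)
      | cons h rs =>
        simp only [pvConsHead, List.map_cons, List.map]
        congr 1
        have hpre3 : (o :: os).isPrefixOf (o :: (os ++ h)) = true := by
          rw [← List.cons_append]
          exact List.isPrefixOf_iff_prefix.mpr (List.prefix_append _ _)
        have : pvRep (o :: os) new ((o :: os) ++ h)
            = new ++ pvRep (o :: os) new ((os ++ h).drop os.length) := by
          simp only [List.cons_append, pvRep]
          rw [if_pos hpre3]
        rw [this, List.drop_left' rfl]
    · rw [show pvRep (o :: os) new (c :: t) = c :: pvRep (o :: os) new t by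
        simp [pvRep, hpre]]
      have iht := ih t.length (by simp) t rfl
      by_cases hc : c = '\n'
      · subst hc
        simp only [pvSplit, iht]
        simp [pvRep]
      · simp only [pvSplit, if_neg hc, iht]
        cases hx : pvSplit t with
        | nil => exact absurd hx (pvSplit_ne_nil t)
        | cons h rs =>
          simp only [List.map_cons, pvConsHead]
          congr 1
          have hnp : ¬ (o :: os).isPrefixOf (c :: h) := by
            intro hp
            apply hpre
            have h1 : (o :: os) <+: (c :: h) := List.isPrefixOf_iff_prefix.mp hp
            have h2 : (c :: h) <+: (c :: t) :=
              (List.prefix_cons_inj c).mpr (pvSplit_head_prefix t h rs hx)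
            exact List.isPrefixOf_iff_prefix.mpr (h1.trans h2)
          simp [pvRep, hnp]

-- A's  if (P and Q1) / elif (P and Q2) / else  is the nested conditional pvFixDefSignature
theorem pvIfShape {α : Type} (P Q1 Q2 : Bool) (e1 e2 x : α) :
    (if P && Q1 then e1 else if P && Q2 then e2 else x)
      = (if P then (if Q1 then e1 else if Q2 then e2 else x) else x) := by
  cases P <;> cases Q1 <;> cases Q2 <;> simp

-- the per-line body of A is the signature fixup after the two replaces
theorem pvLineA_eq (l : List Char) :
    pvLineA l = pvFixDefSignature
      (PySem.Chars.replace (PySem.Chars.replace l "self.model".toList "model".toList)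
        "self.tokenizer".toList "tokenizer".toList) := by
  unfold pvLineA pvFixDefSignature
  exact pvIfShape _ _ _ _ _ _

-- ===== lemmas about pvRep needed for the pass-1 (attribute) scanner =====

theorem pvRep_head_miss (o : Char) (os new : List Char) (c : Char) (t : List Char)
    (h : c ≠ o) : pvRep (o :: os) new (c :: t) = c :: pvRep (o :: os) new t := by
  simp only [pvRep]
  rw [if_neg]
  intro hp
  rw [List.isPrefixOf_iff_prefix, List.cons_prefix_cons] at hp
  exact h hp.1.symm

theorem pvRep_skip (o : Char) (os new a x : List Char) (h : ∀ c ∈ a, c ≠ o) :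
    pvRep (o :: os) new (a ++ x) = a ++ pvRep (o :: os) new x := by
  induction a with
  | nil => simp
  | cons c a' ih =>
    rw [List.cons_append, pvRep_head_miss o os new c (a' ++ x) (h c List.mem_cons_self)]
    rw [ih (fun d hd => h d (List.mem_cons_of_mem _ hd))]
    simp

theorem pvRep_fire (o : Char) (os new r : List Char) :
    pvRep (o :: os) new ((o :: os) ++ r) = new ++ pvRep (o :: os) new r := by
  simp only [List.cons_append, pvRep]
  rw [if_pos (by rw [← List.cons_append]; exact
    List.isPrefixOf_iff_prefix.mpr (List.prefix_append _ _))]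
  rw [List.drop_left' rfl]

-- no creation: rewriting the pattern o :: os into new = m :: nw cannot create a prefix
-- occurrence of any nonempty suffix q' of Q, provided Q avoids both o and m
theorem pvRep_preserves_notPrefix (o : Char) (os : List Char) (m : Char) (nw : List Char)
    (Q : List Char) (hQm : m ∉ Q) :
    ∀ (t q' : List Char), q' ≠ [] → q' <:+ Q → ¬ q'.isPrefixOf t →
      ¬ q'.isPrefixOf (pvRep (o :: os) (m :: nw) t) := by
  intro t
  induction t with
  | nil =>
    intro q' hne _ _
    cases q' with
    | nil => exact absurd rfl hne
    | cons a b => simp [pvRep]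
  | cons c t' ih =>
    intro q' hne hsuf hnp
    obtain ⟨q0, q'', rfl⟩ : ∃ q0 q'', q' = q0 :: q'' := by
      cases q' with
      | nil => exact absurd rfl hne
      | cons a b => exact ⟨a, b, rfl⟩
    have hq0Q : q0 ∈ Q := hsuf.subset List.mem_cons_self
    by_cases hpre : (o :: os).isPrefixOf (c :: t')
    · rw [show pvRep (o :: os) (m :: nw) (c :: t')
          = (m :: nw) ++ pvRep (o :: os) (m :: nw) (t'.drop os.length) by
        simp [pvRep, hpre]]
      intro hcon
      rw [List.isPrefixOf_iff_prefix, List.cons_append, List.cons_prefix_cons] at hcon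
      exact hQm (hcon.1 ▸ hq0Q)
    · rw [show pvRep (o :: os) (m :: nw) (c :: t') = c :: pvRep (o :: os) (m :: nw) t' by
        simp [pvRep, hpre]]
      intro hcon
      rw [List.isPrefixOf_iff_prefix, List.cons_prefix_cons] at hcon
      obtain ⟨rfl, hq''⟩ := hcon
      cases q'' with
      | nil =>
        apply hnp
        rw [List.isPrefixOf_iff_prefix, List.cons_prefix_cons]
        exact ⟨rfl, List.nil_prefix⟩
      | cons b bs =>
        have hq''suf : (b :: bs) <:+ Q := (List.suffix_cons q0 (b :: bs)).trans hsuf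
        have hnp' : ¬ (b :: bs).isPrefixOf t' := by
          intro h
          apply hnp
          rw [List.isPrefixOf_iff_prefix, List.cons_prefix_cons]
          exact ⟨rfl, List.isPrefixOf_iff_prefix.mp h⟩
        exact ih (b :: bs) (by simp) hq''suf hnp'
          (List.isPrefixOf_iff_prefix.mpr hq'')

-- unfold lemma for pvRep at a cons with cons-shaped pattern
theorem pvRep_cons (o : Char) (os new : List Char) (c : Char) (t : List Char) :
    pvRep (o :: os) new (c :: t)
      = if (o :: os).isPrefixOf (c :: t) then new ++ pvRep (o :: os) new (t.drop os.length)
        else c :: pvRep (o :: os) new t := by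
  simp only [pvRep]

-- the four fixed words of pass 1, as explicit character lists
theorem pvTlSM : "self.model".toList = ['s','e','l','f','.','m','o','d','e','l'] := rfl
theorem pvTlST : "self.tokenizer".toList
    = ['s','e','l','f','.','t','o','k','e','n','i','z','e','r'] := rfl
theorem pvTlMD : "model".toList = ['m','o','d','e','l'] := rfl
theorem pvTlTK : "tokenizer".toList = ['t','o','k','e','n','i','z','e','r'] := rfl

-- "self.model" never matches at the front of "self.tokenizer" ++ r (mismatch at index 5)
theorem pvSmod_not_prefix_stok (r : List Char) :
    ¬ (['s','e','l','f','.','m','o','d','e','l'] : List Char).isPrefixOf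
      ('s' :: (['e','l','f','.','t','o','k','e','n','i','z','e','r'] ++ r)) := by
  intro h
  rw [List.isPrefixOf_iff_prefix] at h
  simp [List.cons_prefix_cons] at h

-- pass 1 of B computes exactly A's two chained whole-string replaces
theorem pvAttrScan_eq : ∀ (t : List Char),
    pvAttrScan t = pvRep "self.tokenizer".toList "tokenizer".toList
      (pvRep "self.model".toList "model".toList t) := by
  intro t
  rw [pvTlSM, pvTlST, pvTlMD, pvTlTK]
  induction hs : t.length using Nat.strong_induction_on generalizing t with
  | _ n ih =>
  subst hs
  cases t with
  | nil => simp [pvAttrScan, pvRep]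
  | cons c t' =>
    by_cases h1 : ("self.model".toList).isPrefixOf (c :: t')
    · have hscan : pvAttrScan (c :: t') = "model".toList ++ pvAttrScan ((c :: t').drop 10) := by
        simp only [pvAttrScan]
        rw [if_pos h1]
      rw [pvTlSM] at h1
      obtain ⟨r, hr⟩ := List.isPrefixOf_iff_prefix.mp h1
      have hdrop : (c :: t').drop 10 = r := by rw [← hr]; exact List.drop_left' rfl
      rw [hscan, pvTlMD, hdrop, ← hr]
      rw [show ((['s','e','l','f','.','m','o','d','e','l'] ++ r : List Char))
          = 's' :: (['e','l','f','.','m','o','d','e','l'] ++ r) from rfl]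
      rw [show ('s' :: (['e','l','f','.','m','o','d','e','l'] ++ r) : List Char)
          = ('s' :: ['e','l','f','.','m','o','d','e','l']) ++ r from rfl]
      rw [pvRep_fire]
      rw [pvRep_skip 's' ['e','l','f','.','t','o','k','e','n','i','z','e','r']
        ['t','o','k','e','n','i','z','e','r'] ['m','o','d','e','l'] _ (by simp)]
      have hrlen : r.length < (c :: t').length := by
        have := congrArg List.length hr
        simp only [List.length_append, List.length_cons] at this ⊢
        omega
      rw [ih r.length hrlen r rfl]
    · by_cases h2 : ("self.tokenizer".toList).isPrefixOf (c :: t')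
      · have hscan : pvAttrScan (c :: t')
            = "tokenizer".toList ++ pvAttrScan ((c :: t').drop 14) := by
          simp only [pvAttrScan]
          rw [if_neg h1, if_pos h2]
        rw [pvTlST] at h2
        obtain ⟨r, hr⟩ := List.isPrefixOf_iff_prefix.mp h2
        have hdrop : (c :: t').drop 14 = r := by rw [← hr]; exact List.drop_left' rfl
        rw [hscan, pvTlTK, hdrop, ← hr]
        have hin : pvRep ('s' :: ['e','l','f','.','m','o','d','e','l']) ['m','o','d','e','l']
              (['s','e','l','f','.','t','o','k','e','n','i','z','e','r'] ++ r)
            = ['s','e','l','f','.','t','o','k','e','n','i','z','e','r']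
              ++ pvRep ('s' :: ['e','l','f','.','m','o','d','e','l']) ['m','o','d','e','l'] r := by
          rw [show ((['s','e','l','f','.','t','o','k','e','n','i','z','e','r'] ++ r : List Char))
              = 's' :: (['e','l','f','.','t','o','k','e','n','i','z','e','r'] ++ r) from rfl]
          rw [pvRep_cons]
          rw [if_neg (pvSmod_not_prefix_stok r)]
          rw [pvRep_skip 's' ['e','l','f','.','m','o','d','e','l'] ['m','o','d','e','l']
            ['e','l','f','.','t','o','k','e','n','i','z','e','r'] _ (by simp)]
          rfl
        rw [show ((['s','e','l','f','.','m','o','d','e','l']) : List Char)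
            = 's' :: ['e','l','f','.','m','o','d','e','l'] from rfl, hin]
        rw [show ((['s','e','l','f','.','t','o','k','e','n','i','z','e','r']
              ++ pvRep ('s' :: ['e','l','f','.','m','o','d','e','l']) ['m','o','d','e','l'] r
              : List Char))
            = ('s' :: ['e','l','f','.','t','o','k','e','n','i','z','e','r'])
              ++ pvRep ('s' :: ['e','l','f','.','m','o','d','e','l']) ['m','o','d','e','l'] r
            from rfl]
        rw [show ((['s','e','l','f','.','t','o','k','e','n','i','z','e','r']) : List Char)
            = 's' :: ['e','l','f','.','t','o','k','e','n','i','z','e','r'] from rfl]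
        rw [pvRep_fire]
        have hrlen : r.length < (c :: t').length := by
          have := congrArg List.length hr
          simp only [List.length_append, List.length_cons] at this ⊢
          omega
        rw [ih r.length hrlen r rfl]
      · have hscan : pvAttrScan (c :: t') = c :: pvAttrScan t' := by
          simp only [pvAttrScan]
          rw [if_neg h1, if_neg h2]
        rw [pvTlSM] at h1
        rw [pvTlST] at h2
        rw [hscan]
        rw [show ((['s','e','l','f','.','m','o','d','e','l']) : List Char)
            = 's' :: ['e','l','f','.','m','o','d','e','l'] from rfl,
          pvRep_cons, if_neg (by
            rw [show ('s' :: ['e','l','f','.','m','o','d','e','l'] : List Char)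
              = ['s','e','l','f','.','m','o','d','e','l'] from rfl]
            exact h1)]
        have hout : ¬ (('s' : Char) :: ['e','l','f','.','t','o','k','e','n','i','z','e','r']).isPrefixOf
            (c :: pvRep ('s' :: ['e','l','f','.','m','o','d','e','l']) ['m','o','d','e','l'] t') := by
          by_cases hc : c = 's'
          · subst hc
            have hq : ¬ (['e','l','f','.','t','o','k','e','n','i','z','e','r'] : List Char).isPrefixOf t' := by
              intro hq
              apply h2
              rw [List.isPrefixOf_iff_prefix, List.cons_prefix_cons]
              exact ⟨rfl, List.isPrefixOf_iff_prefix.mp hq⟩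
            have hpres := pvRep_preserves_notPrefix 's' ['e','l','f','.','m','o','d','e','l']
              'm' ['o','d','e','l'] ['e','l','f','.','t','o','k','e','n','i','z','e','r']
              (by simp) t' ['e','l','f','.','t','o','k','e','n','i','z','e','r']
              (by simp) (List.suffix_refl _) hq
            intro hcon
            apply hpres
            rw [List.isPrefixOf_iff_prefix] at hcon
            rw [List.cons_prefix_cons] at hcon
            rw [List.isPrefixOf_iff_prefix]
            exact hcon.2
          · rw [List.isPrefixOf_iff_prefix, List.cons_prefix_cons]
            intro hcon
            exact hc hcon.1.symm
        rw [show ((['s','e','l','f','.','t','o','k','e','n','i','z','e','r']) : List Char)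
            = 's' :: ['e','l','f','.','t','o','k','e','n','i','z','e','r'] from rfl,
          pvRep_cons, if_neg hout]
        rw [ih t'.length (by simp) t' rfl]

-- ===== lemmas about the pass-2 signature scanner =====

theorem pvSigPat_len (b : Bool) : (pvSigPat b).length = 6 := by cases b <;> rfl

theorem pvSigPat_noNL (b : Bool) : '\n' ∉ pvSigPat b := by cases b <;> simp [pvSigPat]

theorem pvSigScan_nl (tgt : Option Bool) (t : List Char) :
    pvSigScan tgt ('\n' :: t) = '\n' :: pvSigScan (pvSigTarget t) t := by
  cases tgt <;> simp [pvSigScan]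

theorem pvSigScan_none_cons (c : Char) (t : List Char) (hc : c ≠ '\n') :
    pvSigScan none (c :: t) = c :: pvSigScan none t := by
  simp only [pvSigScan]
  rw [if_neg hc]

theorem pvSigScan_some_fire (b : Bool) (c : Char) (t : List Char) (hc : c ≠ '\n')
    (hp : (pvSigPat b).isPrefixOf (c :: t)) :
    pvSigScan (some b) (c :: t)
      = pvSigRep b ++ pvSigScan none ((c :: t).drop (pvSigPat b).length) := by
  simp only [pvSigScan]
  rw [if_neg hc, if_pos hp]

theorem pvSigScan_some_skip (b : Bool) (c : Char) (t : List Char) (hc : c ≠ '\n')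
    (hp : ¬ (pvSigPat b).isPrefixOf (c :: t)) :
    pvSigScan (some b) (c :: t) = c :: pvSigScan (some b) t := by
  simp only [pvSigScan]
  rw [if_neg hc, if_neg hp]

-- with no target the scanner copies a newline-free string
theorem pvSigScan_none_id : ∀ (l : List Char), '\n' ∉ l → pvSigScan none l = l := by
  intro l
  induction l with
  | nil => intro _; simp [pvSigScan]
  | cons c t ih =>
    intro h
    rw [pvSigScan_none_cons c t (fun hc => h (hc ▸ List.mem_cons_self))]
    rw [ih (fun ht => h (List.mem_cons_of_mem _ ht))]

-- with an armed target the scanner is exactly Python's line.replace(pat, rep, 1)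
theorem pvSigScan_some_eq : ∀ (a : List Char) (b : Bool), '\n' ∉ a →
    pvSigScan (some b) a = pvReplaceOnce (pvSigPat b) (pvSigRep b) a := by
  intro a
  induction a with
  | nil => intro b _; simp [pvSigScan, pvReplaceOnce]
  | cons c t ih =>
    intro b h
    have hc : c ≠ '\n' := fun hc => h (hc ▸ List.mem_cons_self)
    have ht : '\n' ∉ t := fun ht => h (List.mem_cons_of_mem _ ht)
    by_cases hp : (pvSigPat b).isPrefixOf (c :: t)
    · rw [pvSigScan_some_fire b c t hc hp]
      rw [pvSigScan_none_id _ (fun hm => h (List.drop_subset _ _ hm))]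
      simp [pvReplaceOnce, hp]
    · rw [pvSigScan_some_skip b c t hc hp, ih b ht]
      simp [pvReplaceOnce, hp]

-- a newline-free pattern that matches at the front of x ++ '\n' :: r matches inside x
theorem pvPrefix_confine (p x r : List Char) (hnl : '\n' ∉ p)
    (h : p <+: x ++ '\n' :: r) : p <+: x := by
  by_cases hl : p.length ≤ x.length
  · have hp := List.prefix_iff_eq_take.mp h
    rw [List.take_append_of_le_length hl] at hp
    rw [hp]
    exact List.take_prefix _ _
  · exfalso
    apply hnl
    have hp := List.prefix_iff_eq_take.mp h
    have hx : p[x.length]? = some '\n' := by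
      rw [hp]
      rw [List.getElem?_take_of_lt (by omega)]
      rw [List.getElem?_append_right (by omega)]
      simp
    exact List.mem_of_getElem? hx

-- scanning a line followed by '\n' :: r = scanning the line, then '\n', then r afresh
theorem pvSigScan_line_append : ∀ (a : List Char) (tgt : Option Bool) (r : List Char),
    '\n' ∉ a →
    pvSigScan tgt (a ++ '\n' :: r)
      = pvSigScan tgt a ++ '\n' :: pvSigScan (pvSigTarget r) r := by
  intro a
  induction hs : a.length using Nat.strong_induction_on generalizing a with
  | _ n ih =>
  subst hs
  intro tgt r hnl
  cases a with
  | nil => simp [pvSigScan_nl, pvSigScan]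
  | cons c a' =>
    have hc : c ≠ '\n' := fun h => hnl (h ▸ List.mem_cons_self)
    have ha' : '\n' ∉ a' := fun h => hnl (List.mem_cons_of_mem _ h)
    cases tgt with
    | none =>
      rw [List.cons_append, pvSigScan_none_cons c (a' ++ '\n' :: r) hc,
        pvSigScan_none_cons c a' hc,
        ih a'.length (by simp) a' rfl none r ha']
      simp
    | some b =>
      by_cases hp : (pvSigPat b).isPrefixOf (c :: a')
      · have hp' : (pvSigPat b) <+: (c :: a') := List.isPrefixOf_iff_prefix.mp hp
        have hp2 : (pvSigPat b).isPrefixOf (c :: (a' ++ '\n' :: r)) := by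
          rw [List.isPrefixOf_iff_prefix, show (c :: (a' ++ '\n' :: r) : List Char)
            = (c :: a') ++ '\n' :: r from rfl]
          exact hp'.trans (List.prefix_append _ _)
        have hlen : (pvSigPat b).length ≤ (c :: a').length := hp'.length_le
        rw [List.cons_append, pvSigScan_some_fire b c (a' ++ '\n' :: r) hc hp2,
          pvSigScan_some_fire b c a' hc hp]
        rw [show (c :: (a' ++ '\n' :: r) : List Char) = (c :: a') ++ '\n' :: r from rfl,
          List.drop_append_of_le_length hlen]
        have hdlen : ((c :: a').drop (pvSigPat b).length).length < (c :: a').length := by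
          rw [List.length_drop, pvSigPat_len]
          simp
        rw [ih _ hdlen ((c :: a').drop (pvSigPat b).length) rfl none r
          (fun hm => hnl (List.drop_subset _ _ hm))]
        simp
      · have hp2 : ¬ (pvSigPat b).isPrefixOf (c :: (a' ++ '\n' :: r)) := by
          intro hcon
          apply hp
          rw [List.isPrefixOf_iff_prefix] at hcon ⊢
          rw [show (c :: (a' ++ '\n' :: r) : List Char) = (c :: a') ++ '\n' :: r from rfl] at hcon
          exact pvPrefix_confine _ _ _ (pvSigPat_noNL b) hcon
        rw [List.cons_append, pvSigScan_some_skip b c (a' ++ '\n' :: r) hc hp2,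
          pvSigScan_some_skip b c a' hc hp,
          ih a'.length (by simp) a' rfl (some b) r ha']
        simp

theorem pvTakeWhile_noNL (a : List Char) (h : '\n' ∉ a) :
    a.takeWhile (fun c => c != '\n') = a := by
  induction a with
  | nil => rfl
  | cons c t ih =>
    have hc : c ≠ '\n' := fun hc => h (hc ▸ List.mem_cons_self)
    rw [List.takeWhile_cons_of_pos (by simpa using hc)]
    rw [ih (fun ht => h (List.mem_cons_of_mem _ ht))]

theorem pvTakeWhile_line (a r : List Char) (h : '\n' ∉ a) :
    (a ++ '\n' :: r).takeWhile (fun c => c != '\n') = a := by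
  induction a with
  | nil => simp
  | cons c t ih =>
    have hc : c ≠ '\n' := fun hc => h (hc ▸ List.mem_cons_self)
    rw [List.cons_append, List.takeWhile_cons_of_pos (by simpa using hc)]
    rw [ih (fun ht => h (List.mem_cons_of_mem _ ht))]

theorem pvSigTarget_append (a r : List Char) (h : '\n' ∉ a) :
    pvSigTarget (a ++ '\n' :: r) = pvSigTarget a := by
  unfold pvSigTarget
  rw [pvTakeWhile_line a r h, pvTakeWhile_noNL a h]

-- on one newline-free line, the scanner with its own computed target is A's signature fixup
theorem pvSigScan_fixline (a : List Char) (h : '\n' ∉ a) :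
    pvSigScan (pvSigTarget a) a = pvFixDefSignature a := by
  unfold pvSigTarget pvFixDefSignature
  rw [pvTakeWhile_noNL a h]
  by_cases h1 : PySem.Chars.startswith (PySem.Chars.strip a) "def ".toList = true
  · rw [if_pos h1, if_pos h1]
    by_cases h2 : PySem.Chars.isIn "(self,".toList a = true
    · rw [if_pos h2, if_pos h2]
      exact pvSigScan_some_eq a true h
    · rw [if_neg h2, if_neg h2]
      by_cases h3 : PySem.Chars.isIn "(self)".toList a = true
      · rw [if_pos h3, if_pos h3]
        exact pvSigScan_some_eq a false h
      · rw [if_neg h3, if_neg h3]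
        exact pvSigScan_none_id a h
  · rw [if_neg h1, if_neg h1]
    exact pvSigScan_none_id a h

theorem pvSplit_noNL (s : List Char) (h : '\n' ∉ s) : pvSplit s = [s] := by
  induction s with
  | nil => rfl
  | cons c t ih =>
    have hc : ¬ c = '\n' := fun hc => h (hc ▸ List.mem_cons_self)
    rw [show pvSplit (c :: t) = pvConsHead [c] (pvSplit t) by simp [pvSplit, hc]]
    rw [ih (fun ht => h (List.mem_cons_of_mem _ ht))]
    rfl

theorem pvJoinNL_cons (x : List Char) (L : List (List Char)) (h : L ≠ []) :
    pvJoinNL (x :: L) = x ++ '\n' :: pvJoinNL L := by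
  cases L with
  | nil => exact absurd rfl h
  | cons y r => rfl

theorem pvDropWhile_head : ∀ (l : List Char) (b : Char) (l' : List Char),
    l.dropWhile (fun c => c != '\n') = b :: l' → b = '\n' := by
  intro l
  induction l with
  | nil => intro b l' h; simp [List.dropWhile] at h
  | cons c t ih =>
    intro b l' h
    by_cases hc : c = '\n'
    · subst hc
      rw [List.dropWhile_cons_of_neg (by simp)] at h
      exact (List.cons.injEq .. ▸ h).1.symm ▸ rfl
    · rw [List.dropWhile_cons_of_pos (by simpa using hc)] at h
      exact ih b l' h

-- pass 2 of B is: split into lines, fix each line, join with '\n'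
theorem pvSigScan_join : ∀ (s : List Char),
    pvSigScan (pvSigTarget s) s = pvJoinNL ((pvSplit s).map pvFixDefSignature) := by
  intro s
  induction hs : s.length using Nat.strong_induction_on generalizing s with
  | _ n ih =>
  subst hs
  by_cases h : '\n' ∈ s
  · obtain ⟨a, r, rfl, hnl⟩ : ∃ a r, s = a ++ '\n' :: r ∧ '\n' ∉ a := by
      have hd : ∃ r, s.dropWhile (fun c => c != '\n') = '\n' :: r := by
        cases hd : s.dropWhile (fun c => c != '\n') with
        | nil =>
          exfalso
          have hcat := List.takeWhile_append_dropWhile (p := fun c => c != '\n') (l := s)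
          rw [hd, List.append_nil] at hcat
          have hmem : '\n' ∈ s.takeWhile (fun c => c != '\n') := by rw [hcat]; exact h
          have := List.mem_takeWhile_imp hmem
          simp at this
        | cons b l' =>
          have hb := pvDropWhile_head s b l' hd
          subst hb
          exact ⟨l', rfl⟩
      obtain ⟨r, hr⟩ := hd
      refine ⟨s.takeWhile (fun c => c != '\n'), r, ?_, ?_⟩
      · conv_lhs => rw [← List.takeWhile_append_dropWhile (p := fun c => c != '\n') (l := s)]
        rw [hr]
      · intro hm
        have := List.mem_takeWhile_imp hm
        simp at this
    rw [pvSigTarget_append a r hnl,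
      pvSigScan_line_append a (pvSigTarget a) r hnl,
      pvSigScan_fixline a hnl]
    rw [pvSplit_append a ('\n' :: r) hnl]
    rw [show pvSplit ('\n' :: r) = [] :: pvSplit r by simp [pvSplit]]
    rw [show pvConsHead a ([] :: pvSplit r) = (a ++ []) :: pvSplit r from rfl, List.append_nil]
    rw [List.map_cons]
    rw [pvJoinNL_cons _ _ (by
      intro hcon
      exact pvSplit_ne_nil r (List.map_eq_nil_iff.mp hcon))]
    have hrlen : r.length < (a ++ '\n' :: r).length := by
      simp
      omega
    rw [ih r.length hrlen r rfl]
  · rw [pvSplit_noNL s h, List.map_cons, List.map_nil]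
    exact pvSigScan_fixline s h

theorem pvJoin_eq : ∀ (X : List (List Char)), PySem.Chars.join "\n".toList X = pvJoinNL X := by
  intro X
  induction X with
  | nil => simp [PySem.Chars.join, pvJoinNL, List.intercalate]
  | cons a L ih =>
    cases L with
    | nil => simp [PySem.Chars.join, pvJoinNL, List.intercalate]
    | cons b R =>
      rw [PySem.Chars.join_cons_cons, ih]
      rw [show pvJoinNL (a :: b :: R) = a ++ '\n' :: pvJoinNL (b :: R) from rfl]
      simp

-- ===== VERDICT (by name: the statement is the Claim_ definition above) =====
theorem convert_technique_to_standalone_spec : Claim_equal_convert_technique_to_standalone := by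
  intro s _
  unfold Spec_convert_technique_to_standalone
  show String.ofList (PySem.Chars.join "\n".toList
      ((PySem.Chars.splitOn s.toList "\n".toList).map pvLineA))
    = String.ofList (pvSigScan (pvSigTarget (pvAttrScan s.toList)) (pvAttrScan s.toList))
  rw [pvAttrScan_eq, pvSigScan_join, pvJoin_eq]
  rw [show ("\n".toList : List Char) = ['\n'] from rfl, pvSplitOn_eq]
  congr 1
  congr 1
  rw [pvSplit_rep "self.tokenizer".toList "tokenizer".toList (by simp) (by simp) (by simp)]
  rw [pvSplit_rep "self.model".toList "model".toList (by simp) (by simp) (by simp)]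
  rw [List.map_map, List.map_map]
  apply List.map_congr_left
  intro l _
  simp only [Function.comp]
  rw [pvLineA_eq l]
  rw [pvReplace_eq _ _ _ (by simp), pvReplace_eq _ _ _ (by simp)]
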